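-- pv_equiv track=rewrite | github.com/emteeoh/AdventOfCode2022 | Day 6/day6-2.py | isRepeats
-- ===== SOURCE A (Python) =====
-- def isRepeats(s):
--     counts = dict()
--     for ii in s:
--         counts[ii] = 1
--     if len(counts.keys()) == len(s):
--         return False
--     else:
--         return True
-- ===== SOURCE B (Python) =====
-- def isRepeats(s):
--     chars = sorted(s)
--     for i in range(1, len(chars)):
--         if chars[i] == chars[i - 1]:
--             return True
--     return False
-- ===== Notes on version B (the rewrite author's own statement) =====
-- stated objective: alternative
-- what changed: Replaces the count-dictionary build plus distinct-count/length comparison with a sort followed by an adjacent-equal scan with early exit.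
import Mathlib
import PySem

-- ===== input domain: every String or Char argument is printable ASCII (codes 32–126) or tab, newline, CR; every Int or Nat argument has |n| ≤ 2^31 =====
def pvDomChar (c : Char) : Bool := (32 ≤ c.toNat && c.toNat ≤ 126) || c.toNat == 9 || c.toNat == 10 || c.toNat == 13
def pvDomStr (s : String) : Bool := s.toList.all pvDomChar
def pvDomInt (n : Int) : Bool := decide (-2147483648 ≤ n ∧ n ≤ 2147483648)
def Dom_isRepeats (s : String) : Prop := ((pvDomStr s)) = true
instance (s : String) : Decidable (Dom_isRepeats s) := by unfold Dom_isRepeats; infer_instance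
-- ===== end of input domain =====

-- B replaces A's count-dictionary build + distinct-count/length comparison with a sorted copy and an adjacent-equal scan (alternative decomposition, no speed claim).

-- ===== PORT A =====
def isRepeats (s : String) : Bool :=
  let counts := s.toList.foldl (fun d ii => d.insert ii (1 : Int)) PySem.Dict.empty
  if ((counts.keys.length : Int) == PySem.Str.len s) then false else true

-- ===== PORT B =====
-- Source B's 'for i in range(1, len(chars))' adjacency loop, as structural recursion over the sorted list
def pvAdjScan : List Char → Bool
  | a :: b :: t => if b == a then true else pvAdjScan (b :: t)
  | _ => false

def isRepeats_alt (s : String) : Bool :=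
  pvAdjScan (PySem.List.sorted s.toList (fun c => c) false)

-- ===== PRECONDITION & SPEC =====
def Spec_isRepeats (s : String) (out : Bool) : Prop := out = isRepeats_alt s
instance (s : String) (out : Bool) : Decidable (Spec_isRepeats s out) := by unfold Spec_isRepeats; infer_instance

-- ===== CLAIM (what is proved, stated in full; the proofs are below) =====
def Claim_equal_isRepeats : Prop := ∀ (s : String), Dom_isRepeats s → Spec_isRepeats s (isRepeats s)

-- ===== LEMMAS AND PROOFS =====

-- set(cs) (first occurrences, in order) is a sublist of cs
theorem pv_ofList_sublist (cs : List Char) : (PySem.Set.ofList cs).Sublist cs := by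
  induction cs with
  | nil => simp [PySem.Set.ofList]
  | cons x xs ih =>
    rw [PySem.Set.ofList_cons]
    exact List.Sublist.cons₂ x (List.Sublist.trans (by simp [PySem.Set.discard]) ih)

-- A's test: the number of distinct characters equals the length iff there is no repeat
theorem pv_ofList_length_eq_iff_nodup (cs : List Char) :
    (PySem.Set.ofList cs).length = cs.length ↔ cs.Nodup := by
  constructor
  · intro h
    have := (pv_ofList_sublist cs).eq_of_length h
    rw [← this]
    exact PySem.Set.nodup_ofList cs
  · intro h
    rw [PySem.Set.ofList_eq_self_of_nodup cs h]

-- B's scan: on a ≤-sorted list, an adjacent equal pair exists iff the list is not Nodup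
theorem pv_adjScan_eq_not_nodup (ys : List Char) (hp : ys.Pairwise (· ≤ ·)) :
    pvAdjScan ys = !decide ys.Nodup := by
  induction ys with
  | nil => simp [pvAdjScan]
  | cons a t ih =>
    match t with
    | [] => simp [pvAdjScan]
    | b :: t' =>
      have hpt : (b :: t').Pairwise (· ≤ ·) := hp.tail
      by_cases hba : b = a
      · subst hba
        simp [pvAdjScan]
      · have hab : a ≤ b := (List.pairwise_cons.mp hp).1 b (by simp)
        have hnm : a ∉ b :: t' := by
          intro hmem
          rcases List.mem_cons.mp hmem with h1 | h2
          · exact hba h1.symm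
          · have hbx : b ≤ a := (List.pairwise_cons.mp hpt).1 a h2
            exact hba (le_antisymm hbx hab)
        have hstep : pvAdjScan (a :: b :: t') = pvAdjScan (b :: t') := by
          simp [pvAdjScan, hba]
        rw [hstep, ih hpt]
        simp [List.nodup_cons, hnm]

-- ===== VERDICT (by name: the statement is the Claim_ definition above) =====
theorem isRepeats_spec : Claim_equal_isRepeats := by
  intro s _
  unfold Spec_isRepeats isRepeats isRepeats_alt
  have hkeys : ((s.toList.foldl (fun d ii => d.insert ii (1 : Int)) PySem.Dict.empty).keys)
      = PySem.Set.ofList s.toList := by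
    rw [PySem.Dict.keys_foldl_insert s.toList (fun _ _ => (1 : Int)) PySem.Dict.empty]
    simp [PySem.Set.update_nil_left]
  have hsort := PySem.List.sorted_perm s.toList (fun c => c) false
  have hpair := PySem.List.sorted_pairwise s.toList (fun c => c)
  rw [pv_adjScan_eq_not_nodup _ hpair]
  simp only [hkeys, PySem.Str.len_eq, hsort.nodup_iff]
  by_cases hn : s.toList.Nodup
  · have h1 : (PySem.Set.ofList s.toList).length = s.toList.length :=
      (pv_ofList_length_eq_iff_nodup s.toList).mpr hn
    simp [h1, hn]
  · have h1 : (PySem.Set.ofList s.toList).length ≠ s.toList.length :=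
      fun h => hn ((pv_ofList_length_eq_iff_nodup s.toList).mp h)
    have h2 : ¬ (PySem.Set.ofList s.toList).length = s.length := by simpa using h1
    simp [hn, h2]
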